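-- pv_equiv track=rewrite | github.com/pypi-data/pypi-mirror-365 | packages/FairLangProc/fairlangproc-0.1.3-py3-none-any.whl/FairLangProc/metrics/generated_text.py | StereoAsoc
-- ===== SOURCE A (Python) =====
-- def StereoAsoc(
--     targetWords: list[str],
--     demWords: dict[str, list[str]],
--     sentences: list[str]
--     ) -> dict[str, dict[str, int]]:
--     r"""Computes Stereotypical Association
--
--     Parameters
--     ----------
--     targetWords : list[str]
--         List of words whose associations we want to compute.
--     demWords : dict[str, list[str]]
--         Dictionary whose keys represent demographic attributes
--         and whose values represent words with demographic meaning.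
--     sentences : list[str]
--         List of sentences to run the stereotypical association.
--
--     Returns
--     -------
--     steAsocVect : dict
--         Dictionary which stores demographic counts for all considered
--         words and sentences indexed by targetWords.
--
--     Example
--     -------
--     >>> gendered_words = {
--     ...     'male': ['he', 'him', 'his'],
--     ...     'female': ['she', 'her', 'actress', 'hers']
--     ...     }
--     >>> sentences = [
--     ...     'She is such a good match to him.',
--     ...     'He is trying way too hard to be an actor.',
--     ...     'Her mother is trying to make ends meet.'
--     ...     'My aunt is baking, do you want to try?'
--     ...     ]
--     >>> target_words = ['mother', 'baking']
--
--     >>> ST = StereoAsoc(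
--             sentences = sentences,
--             demWords = gendered_words,
--             targetWords = target_words
--             )
--     """
--
--     steAsocVect = {word: {a: 0 for a in demWords.keys()} for word in targetWords}
--
--     for word in targetWords:
--         for demographic in demWords.keys():
--             for demWord in demWords[demographic]:
--                 for sentence in sentences:
--                     isWordPresent = sentence.lower().split().count(word) > 0
--                     steAsocVect[word][demographic] += sentence.lower().split().count(demWord)*isWordPresent
--
--     return steAsocVect
-- ===== SOURCE B (Python) =====
-- def StereoAsoc(
--     targetWords: list[str],
--     demWords: dict[str, list[str]],
--     sentences: list[str]
--     ) -> dict[str, dict[str, int]]: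
--     """One pass over the sentences: per sentence build a token-frequency
--     table once, precompute each demographic's count, then add it to every
--     target word present in the sentence."""
--     steAsocVect = {word: {a: 0 for a in demWords} for word in targetWords}
--
--     for sentence in sentences:
--         tokens = sentence.lower().split()
--         freq = {}
--         for t in tokens:
--             freq[t] = freq.get(t, 0) + 1
--         demCount = [(dem, sum(freq.get(dw, 0) for dw in dws))
--                     for dem, dws in demWords.items()]
--         for word in targetWords:
--             if word in freq:
--                 row = steAsocVect[word]
--                 for dem, cnt in demCount:
--                     row[dem] += cnt
--
--     return steAsocVect
-- ===== Notes on version B (the rewrite author's own statement) =====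
-- stated objective: faster
-- what changed: Replaced A's four nested loops (which re-lowercase and re-split every sentence for every target/demographic/dem-word triple) by a single pass over the sentences that tokenizes each sentence once, builds a token-frequency table, precomputes each demographic's count, and adds it to every target word present.
import Mathlib
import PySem

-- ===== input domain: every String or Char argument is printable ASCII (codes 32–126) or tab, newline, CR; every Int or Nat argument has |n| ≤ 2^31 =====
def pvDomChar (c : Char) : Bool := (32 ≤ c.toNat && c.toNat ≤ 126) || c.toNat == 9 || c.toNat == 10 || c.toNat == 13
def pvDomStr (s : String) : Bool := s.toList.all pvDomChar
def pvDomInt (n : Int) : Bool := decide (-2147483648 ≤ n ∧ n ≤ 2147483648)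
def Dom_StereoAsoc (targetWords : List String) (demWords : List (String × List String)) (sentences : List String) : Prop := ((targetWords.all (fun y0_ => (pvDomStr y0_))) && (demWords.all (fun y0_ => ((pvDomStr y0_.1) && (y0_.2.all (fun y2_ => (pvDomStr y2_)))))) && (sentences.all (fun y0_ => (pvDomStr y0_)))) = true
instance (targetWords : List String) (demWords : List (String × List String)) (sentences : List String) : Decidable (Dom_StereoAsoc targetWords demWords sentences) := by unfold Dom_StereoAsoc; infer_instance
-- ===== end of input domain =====

-- B replaces A's four nested loops (which re-tokenize every sentence for every
-- target/demographic/dem-word triple) with a single pass over the sentences that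
-- tokenizes each sentence once, builds a token-frequency table and per-demographic
-- counts, and adds them to the rows of the target words present in the sentence.

-- sentence.lower().split() — computed by both programs
def pvTok (s : String) : List String := PySem.Str.split₀ (PySem.Str.lower s)

-- ===== PORT A =====
def StereoAsoc (targetWords : List String) (demWords : List (String × List String)) (sentences : List String) : List (String × List (String × Int)) :=
  let d := PySem.Dict.ofList demWords
  let steAsocVect0 : PySem.Dict String (PySem.Dict String Int) :=
    targetWords.foldl (fun m word =>
      m.insert word (d.keys.foldl (fun r a => r.insert a (0 : Int)) PySem.Dict.empty)) PySem.Dict.empty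
  let steAsocVect := targetWords.foldl (fun m word =>
    d.keys.foldl (fun m demographic =>
      (d.getD demographic []).foldl (fun m demWord =>
        sentences.foldl (fun m sentence =>
          m.modify word PySem.Dict.empty (fun r =>
            r.modify demographic 0 (fun x => x + ((pvTok sentence).count demWord : Int) *
              (if 0 < (pvTok sentence).count word then 1 else 0)))) m) m) m) steAsocVect0
  steAsocVect.items.map (fun p => (p.1, p.2.items))

-- ===== PORT B =====
def StereoAsoc_alt (targetWords : List String) (demWords : List (String × List String)) (sentences : List String) : List (String × List (String × Int)) :=
  let d := PySem.Dict.ofList demWords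
  let init : PySem.Dict String (PySem.Dict String Int) :=
    targetWords.foldl (fun m word =>
      m.insert word (d.keys.foldl (fun r a => r.insert a (0 : Int)) PySem.Dict.empty)) PySem.Dict.empty
  let final := sentences.foldl (fun m sentence =>
    let freq : PySem.Dict String Int :=
      (pvTok sentence).foldl (fun f t => f.insert t (f.getD t 0 + 1)) PySem.Dict.empty
    let demCount : List (String × Int) :=
      d.items.map (fun p => (p.1, (p.2.map (fun dw => freq.getD dw 0)).sum))
    targetWords.foldl (fun m word =>
      if freq.contains word then
        demCount.foldl (fun m q =>
          m.modify word PySem.Dict.empty (fun r => r.modify q.1 0 (fun x => x + q.2))) m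
      else m) m) init
  final.items.map (fun p => (p.1, p.2.items))

-- ===== PRECONDITION & SPEC =====
def Spec_StereoAsoc (targetWords : List String) (demWords : List (String × List String)) (sentences : List String) (out : List (String × List (String × Int))) : Prop := out = StereoAsoc_alt targetWords demWords sentences
instance (targetWords : List String) (demWords : List (String × List String)) (sentences : List String) (out : List (String × List (String × Int))) : Decidable (Spec_StereoAsoc targetWords demWords sentences out) := by unfold Spec_StereoAsoc; infer_instance

-- ===== CLAIM (what is proved, stated in full; the proofs are below) =====
def Claim_equal_StereoAsoc : Prop := ∀ (targetWords : List String) (demWords : List (String × List String)) (sentences : List String), Dom_StereoAsoc targetWords demWords sentences → Spec_StereoAsoc targetWords demWords sentences (StereoAsoc targetWords demWords sentences)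

-- ===== LEMMAS AND PROOFS =====

-- every update either program performs is "add c to cell (w, a)":
def pvStep (m : PySem.Dict String (PySem.Dict String Int)) (p : String × String × Int) : PySem.Dict String (PySem.Dict String Int) :=
  m.modify p.1 PySem.Dict.empty (fun r => r.modify p.2.1 0 (fun x => x + p.2.2))

def pvCell (m : PySem.Dict String (PySem.Dict String Int)) (w a : String) : Int :=
  (m.getD w PySem.Dict.empty).getD a 0

def pvFreq (s : String) : PySem.Dict String Int :=
  (pvTok s).foldl (fun f t => f.insert t (f.getD t 0 + 1)) PySem.Dict.empty

-- the sequences of cell updates performed by A resp. B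
def pvAtomsA (T : List String) (d : PySem.Dict String (List String)) (S : List String) : List (String × String × Int) :=
  T.flatMap (fun w => d.keys.flatMap (fun a => (d.getD a []).flatMap (fun dw =>
    S.map (fun s => (w, a, ((pvTok s).count dw : Int) * (if 0 < (pvTok s).count w then (1 : Int) else 0))))))

def pvAtomsB (T : List String) (d : PySem.Dict String (List String)) (S : List String) : List (String × String × Int) :=
  S.flatMap (fun s =>
    (T.filter (fun w => (pvFreq s).contains w)).flatMap (fun w =>
      (d.items.map (fun p => (p.1, (p.2.map (fun dw => (pvFreq s).getD dw 0)).sum))).map (fun q => (w, q.1, q.2))))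

lemma pvA_atoms (T : List String) (d : PySem.Dict String (List String)) (S : List String)
    (m : PySem.Dict String (PySem.Dict String Int)) :
    T.foldl (fun m word =>
      d.keys.foldl (fun m demographic =>
        (d.getD demographic []).foldl (fun m demWord =>
          S.foldl (fun m sentence =>
            m.modify word PySem.Dict.empty (fun r =>
              r.modify demographic 0 (fun x => x + ((pvTok sentence).count demWord : Int) *
                (if 0 < (pvTok sentence).count word then 1 else 0)))) m) m) m) m
    = (pvAtomsA T d S).foldl pvStep m := by
  simp only [pvAtomsA, List.foldl_flatMap, List.foldl_map, pvStep]

lemma pvB_atoms (T : List String) (d : PySem.Dict String (List String)) (S : List String)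
    (m : PySem.Dict String (PySem.Dict String Int)) :
    S.foldl (fun m sentence =>
      T.foldl (fun m word =>
        if ((pvTok sentence).foldl (fun f t => f.insert t (f.getD t 0 + 1)) (PySem.Dict.empty : PySem.Dict String Int)).contains word then
          (d.items.map (fun p => (p.1, (p.2.map (fun dw =>
            ((pvTok sentence).foldl (fun f t => f.insert t (f.getD t 0 + 1)) (PySem.Dict.empty : PySem.Dict String Int)).getD dw 0)).sum))).foldl
            (fun m q => m.modify word PySem.Dict.empty (fun r => r.modify q.1 0 (fun x => x + q.2))) m
        else m) m) m
    = (pvAtomsB T d S).foldl pvStep m := by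
  simp only [pvAtomsB, pvFreq, List.foldl_flatMap, List.foldl_map, List.foldl_filter, pvStep]

lemma pvCell_step (m : PySem.Dict String (PySem.Dict String Int)) (p : String × String × Int) (w a : String) :
    pvCell (pvStep m p) w a = pvCell m w a + (if w = p.1 ∧ a = p.2.1 then p.2.2 else 0) := by
  unfold pvCell pvStep
  by_cases h1 : w = p.1
  · subst h1
    rw [PySem.Dict.getD_modify, if_pos rfl, PySem.Dict.getD_modify]
    by_cases h2 : a = p.2.1
    · subst h2
      rw [if_pos rfl, if_pos ⟨rfl, rfl⟩]
    · rw [if_neg h2, if_neg (fun hh => h2 hh.2), add_zero]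
  · rw [PySem.Dict.getD_modify, if_neg h1, if_neg (fun hh => h1 hh.1), add_zero]

lemma pvCell_foldl (l : List (String × String × Int)) (m : PySem.Dict String (PySem.Dict String Int)) (w a : String) :
    pvCell (l.foldl pvStep m) w a
      = pvCell m w a + (l.map (fun p => if w = p.1 ∧ a = p.2.1 then p.2.2 else 0)).sum := by
  induction l generalizing m with
  | nil => simp
  | cons p l ih => simp only [List.foldl_cons, ih, pvCell_step, List.map_cons, List.sum_cons]; ring

-- shape invariant: outer keys are the deduplicated target words, each present row has keys ks
def pvShape (T ks : List String) (m : PySem.Dict String (PySem.Dict String Int)) : Prop :=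
  m.keys = PySem.List.dedup T ∧ ∀ w ∈ T, (m.getD w PySem.Dict.empty).keys = ks

lemma pvShape_step {T ks : List String} {m : PySem.Dict String (PySem.Dict String Int)}
    {p : String × String × Int} (hT : p.1 ∈ T) (ha : p.2.1 ∈ ks) (h : pvShape T ks m) :
    pvShape T ks (pvStep m p) := by
  obtain ⟨hk, hr⟩ := h
  have hc : m.contains p.1 = true :=
    (PySem.Dict.contains_iff_mem_keys m p.1).mpr (hk ▸ (PySem.List.mem_dedup T p.1).mpr hT)
  constructor
  · unfold pvStep
    rw [PySem.Dict.keys_modify, PySem.Dict.keys_insert_of_contains _ _ hc, hk]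
  · intro w hw
    unfold pvStep
    rw [PySem.Dict.getD_modify]
    by_cases hwp : w = p.1
    · rw [if_pos hwp]
      have hrc : (m.getD p.1 PySem.Dict.empty).contains p.2.1 = true :=
        (PySem.Dict.contains_iff_mem_keys _ _).mpr (by rw [hr p.1 hT]; exact ha)
      rw [PySem.Dict.keys_modify, PySem.Dict.keys_insert_of_contains _ _ hrc]
      exact hr p.1 hT
    · rw [if_neg hwp]
      exact hr w hw

lemma pvShape_foldl {T ks : List String} (l : List (String × String × Int))
    (hl : ∀ p ∈ l, p.1 ∈ T ∧ p.2.1 ∈ ks) {m : PySem.Dict String (PySem.Dict String Int)}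
    (h : pvShape T ks m) : pvShape T ks (l.foldl pvStep m) := by
  induction l generalizing m with
  | nil => exact h
  | cons p l ih =>
      exact ih (fun q hq => hl q (List.mem_cons_of_mem _ hq))
        (pvShape_step (hl p (List.mem_cons_self ..)).1 (hl p (List.mem_cons_self ..)).2 h)

lemma pvGetD_foldl_insert_const {ν : Type} (T : List String) (r0 : ν)
    (m : PySem.Dict String ν) (w : String) (dflt : ν) :
    (T.foldl (fun m x => m.insert x r0) m).getD w dflt = if w ∈ T then r0 else m.getD w dflt := by
  induction T generalizing m with
  | nil => simp
  | cons x T ih =>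
      rw [List.foldl_cons, ih]
      by_cases h : w ∈ T
      · simp [h]
      · simp only [h, if_false, PySem.Dict.getD_insert, List.mem_cons]
        by_cases h2 : w = x <;> simp [h2]

lemma pvShape_init (T ks : List String) :
    pvShape T (PySem.Set.ofList ks) (T.foldl (fun m word =>
      m.insert word (ks.foldl (fun r a => r.insert a (0 : Int)) PySem.Dict.empty)) PySem.Dict.empty) := by
  constructor
  · rw [PySem.Dict.keys_foldl_insert]
    simp [PySem.Dict.keys_empty, PySem.Set.update_nil_left, PySem.List.dedup_eq_ofList]
  · intro w hw
    rw [pvGetD_foldl_insert_const, if_pos hw, PySem.Dict.keys_foldl_insert]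
    simp [PySem.Dict.keys_empty, PySem.Set.update_nil_left]

lemma pvCell_init (T ks : List String) (w a : String) :
    pvCell (T.foldl (fun m word =>
      m.insert word (ks.foldl (fun r a => r.insert a (0 : Int)) PySem.Dict.empty)) PySem.Dict.empty) w a = 0 := by
  unfold pvCell
  rw [pvGetD_foldl_insert_const]
  by_cases h : w ∈ T
  · rw [if_pos h, pvGetD_foldl_insert_const]
    by_cases h2 : a ∈ ks <;> simp [h2, PySem.Dict.getD_empty]
  · simp [h, PySem.Dict.getD_empty]

lemma pvRender {T ks : List String} {m : PySem.Dict String (PySem.Dict String Int)}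
    (h : pvShape T ks m) (hks : ks.Nodup) :
    m.items.map (fun p => (p.1, p.2.items))
      = (PySem.List.dedup T).map (fun w => (w, ks.map (fun a => (a, pvCell m w a)))) := by
  have hnd : m.keys.Nodup := by
    rw [h.1, PySem.List.dedup_eq_ofList]; exact PySem.Set.nodup_ofList T
  rw [PySem.Dict.items_eq_map_keys m hnd PySem.Dict.empty, h.1, List.map_map]
  refine List.map_congr_left fun w hw => ?_
  have hwT : w ∈ T := (PySem.List.mem_dedup T w).mp hw
  have hrow : (m.getD w PySem.Dict.empty).keys = ks := h.2 w hwT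
  simp only [Function.comp_def]
  rw [PySem.Dict.items_eq_map_keys _ (by rw [hrow]; exact hks) (0 : Int), hrow]
  rfl

-- sum bookkeeping
lemma pvSum_map_flatMap {α β : Type} (l : List α) (g : α → List β) (f : β → Int) :
    ((l.flatMap g).map f).sum = (l.map (fun x => ((g x).map f).sum)).sum := by
  induction l with
  | nil => simp
  | cons x l ih => simp [List.flatMap_cons, ih]

lemma pvSum_map_filter {α : Type} (l : List α) (q : α → Bool) (f : α → Int) :
    ((l.filter q).map f).sum = (l.map (fun x => if q x then f x else 0)).sum := by
  induction l with
  | nil => simp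
  | cons x l ih => by_cases h : q x <;> simp [h, ih]

lemma pvSum_swap {α β : Type} (l₁ : List α) (l₂ : List β) (f : α → β → Int) :
    (l₁.map (fun x => (l₂.map (f x)).sum)).sum = (l₂.map (fun y => (l₁.map (fun x => f x y)).sum)).sum := by
  induction l₁ with
  | nil => simp
  | cons x l ih =>
      simp only [List.map_cons, List.sum_cons, ih]
      rw [← PySem.List.sum_map_add_int]

lemma pvIte_sum {α : Type} (c : Prop) [Decidable c] (l : List α) (f : α → Int) :
    (if c then (l.map f).sum else 0) = (l.map (fun x => if c then f x else 0)).sum := by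
  by_cases h : c <;> simp [h]

lemma pvFreq_contains (s : String) (w : String) :
    (pvFreq s).contains w = decide (w ∈ pvTok s) := by
  unfold pvFreq
  rw [PySem.Dict.contains_eq_decide_mem_keys, PySem.Dict.keys_foldl_insert]
  simp [PySem.Dict.keys_empty, PySem.Set.update_nil_left, PySem.Set.mem_ofList]

lemma pvFreq_getD (s : String) (t : String) :
    (pvFreq s).getD t 0 = ((pvTok s).count t : Int) := by
  unfold pvFreq
  rw [PySem.Dict.getD_foldl_insert_add_one]
  simp [PySem.Dict.getD_empty]

lemma pvCell_eq (T : List String) (d : PySem.Dict String (List String)) (S : List String)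
    (hnd : d.keys.Nodup) (w a : String) :
    ((pvAtomsA T d S).map (fun p => if w = p.1 ∧ a = p.2.1 then p.2.2 else 0)).sum
      = ((pvAtomsB T d S).map (fun p => if w = p.1 ∧ a = p.2.1 then p.2.2 else 0)).sum := by
  have hitems := PySem.Dict.items_eq_map_keys d hnd []
  simp only [pvAtomsA, pvAtomsB, pvSum_map_flatMap, List.map_map, Function.comp_def,
    pvSum_map_filter, hitems, pvFreq_getD, pvFreq_contains]
  conv_rhs => rw [pvSum_swap]
  refine congrArg List.sum (List.map_congr_left fun w0 _ => ?_)
  by_cases hw : w = w0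
  · subst hw
    simp only [true_and, decide_eq_true_eq]
    simp only [pvIte_sum]
    conv_rhs => rw [pvSum_swap]
    refine congrArg List.sum (List.map_congr_left fun a0 _ => ?_)
    by_cases ha : a = a0
    · subst ha
      simp only [if_pos trivial]
      conv_lhs => rw [pvSum_swap]
      refine congrArg List.sum (List.map_congr_left fun s _ => ?_)
      by_cases hm : w ∈ pvTok s
      · have hc : 0 < (pvTok s).count w := List.count_pos_iff.mpr hm
        simp [hm, hc, mul_one]
      · have hc : ¬ 0 < (pvTok s).count w := by simp [List.count_pos_iff, hm]
        simp [hm, hc]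
    · simp [ha]
  · simp [hw]

lemma pvAtomsA_mem (T : List String) (d : PySem.Dict String (List String)) (S : List String) :
    ∀ p ∈ pvAtomsA T d S, p.1 ∈ T ∧ p.2.1 ∈ PySem.Set.ofList d.keys := by
  intro p hp
  simp only [pvAtomsA, List.mem_flatMap, List.mem_map] at hp
  obtain ⟨w, hw, a, ha, dw, _, s, _, rfl⟩ := hp
  exact ⟨hw, (PySem.Set.mem_ofList _ _).mpr ha⟩

lemma pvAtomsB_mem (T : List String) (d : PySem.Dict String (List String)) (S : List String) :
    ∀ p ∈ pvAtomsB T d S, p.1 ∈ T ∧ p.2.1 ∈ PySem.Set.ofList d.keys := by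
  intro p hp
  simp only [pvAtomsB, List.mem_flatMap, List.mem_map, List.mem_filter] at hp
  obtain ⟨s, _, w, hw, q, ⟨p0, hp0, rfl⟩, rfl⟩ := hp
  exact ⟨hw.1, (PySem.Set.mem_ofList _ _).mpr (PySem.Dict.mem_keys_of_mem_items d hp0)⟩

-- ===== VERDICT (by name: the statement is the Claim_ definition above) =====
theorem StereoAsoc_spec : Claim_equal_StereoAsoc := by
  intro T dW S _hdom
  unfold Spec_StereoAsoc StereoAsoc StereoAsoc_alt
  simp only
  rw [pvA_atoms, pvB_atoms]
  have hnd := PySem.Dict.nodup_keys_ofList dW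
  have hker : (PySem.Set.ofList (PySem.Dict.ofList dW).keys).Nodup :=
    PySem.Set.nodup_ofList _
  have h0 := pvShape_init T (PySem.Dict.ofList dW).keys
  rw [pvRender (pvShape_foldl _ (pvAtomsA_mem T (PySem.Dict.ofList dW) S) h0) hker,
      pvRender (pvShape_foldl _ (pvAtomsB_mem T (PySem.Dict.ofList dW) S) h0) hker]
  refine List.map_congr_left fun w _ => ?_
  refine congrArg _ (List.map_congr_left fun a _ => ?_)
  refine congrArg _ ?_
  rw [pvCell_foldl, pvCell_foldl, pvCell_init, zero_add, zero_add]
  exact pvCell_eq T (PySem.Dict.ofList dW) S hnd w a
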